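-- pv_equiv track=rewrite | github.com/Appforgelabs/KidWatch | scripts/build_history_from_text.py | categorize_video
-- ===== SOURCE A (Python) =====
-- def categorize_video(title, channel):
--     """Assign category based on title/channel"""
--     title_lower = title.lower()
--     channel_lower = channel.lower()
--
--     if any(x in title_lower for x in ['phonics', 'alphabet', 'abc', 'reading', 'learn', 'educational', 'words', 'letters']):
--         return 'Educational'
--     if any(x in channel_lower for x in ['yakka dee', 'kidstv123', 'numberblocks', 'cbeebies', 'bbc kids']):
--         return 'Educational'
--     if any(x in title_lower for x in ['peppa pig', 'peppa']):
--         return 'Cartoon/Show'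
--     if any(x in title_lower for x in ['toca boca', 'toca life', 'avatar world', 'roleplay', 'role-play', 'role play']):
--         return 'Gaming/Roleplay'
--     if any(x in title_lower for x in ['nursery rhymes', 'kids songs', 'song', 'music']):
--         return 'Music/Songs'
--     if any(x in title_lower for x in ['read aloud', 'storytime', 'story time', 'book']):
--         return 'Storytime'
--     if any(x in title_lower for x in ['logo sound', 'quiz', 'guess']):
--         return 'Quiz/Games'
--     if 'routine' in title_lower:
--         return 'Gaming/Roleplay'
--     return 'Other'
-- ===== SOURCE B (Python) =====
-- # Flat keyword scan with argmin-priority accumulator: examine every keyword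
-- # (no short-circuit cascade) and return the category of the matching keyword
-- # with the smallest rule priority; 'Other' if nothing matches.
-- _KEYWORDS = [
--     (0, False, 'phonics', 'Educational'), (0, False, 'alphabet', 'Educational'),
--     (0, False, 'abc', 'Educational'), (0, False, 'reading', 'Educational'),
--     (0, False, 'learn', 'Educational'), (0, False, 'educational', 'Educational'),
--     (0, False, 'words', 'Educational'), (0, False, 'letters', 'Educational'),
--     (1, True, 'yakka dee', 'Educational'), (1, True, 'kidstv123', 'Educational'),
--     (1, True, 'numberblocks', 'Educational'), (1, True, 'cbeebies', 'Educational'),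
--     (1, True, 'bbc kids', 'Educational'),
--     (2, False, 'peppa pig', 'Cartoon/Show'), (2, False, 'peppa', 'Cartoon/Show'),
--     (3, False, 'toca boca', 'Gaming/Roleplay'), (3, False, 'toca life', 'Gaming/Roleplay'),
--     (3, False, 'avatar world', 'Gaming/Roleplay'), (3, False, 'roleplay', 'Gaming/Roleplay'),
--     (3, False, 'role-play', 'Gaming/Roleplay'), (3, False, 'role play', 'Gaming/Roleplay'),
--     (4, False, 'nursery rhymes', 'Music/Songs'), (4, False, 'kids songs', 'Music/Songs'),
--     (4, False, 'song', 'Music/Songs'), (4, False, 'music', 'Music/Songs'),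
--     (5, False, 'read aloud', 'Storytime'), (5, False, 'storytime', 'Storytime'),
--     (5, False, 'story time', 'Storytime'), (5, False, 'book', 'Storytime'),
--     (6, False, 'logo sound', 'Quiz/Games'), (6, False, 'quiz', 'Quiz/Games'),
--     (6, False, 'guess', 'Quiz/Games'),
--     (7, False, 'routine', 'Gaming/Roleplay'),
-- ]
--
-- def categorize_video(title, channel):
--     """Assign category based on title/channel"""
--     title_lower = title.lower()
--     channel_lower = channel.lower()
--     best = None
--     for prio, use_channel, kw, cat in _KEYWORDS:
--         text = channel_lower if use_channel else title_lower
--         if kw in text and (best is None or prio < best[0]):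
--             best = (prio, cat)
--     return 'Other' if best is None else best[1]
-- ===== Notes on version B (the rewrite author's own statement) =====
-- stated objective: alternative
-- what changed: A's ordered early-exit if-cascade of per-category any() tests is replaced by a single exhaustive pass over one flat keyword list that keeps an argmin accumulator (lowest-priority matching keyword wins), with the answer read off the accumulator at the end instead of returned early.
import Mathlib
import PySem

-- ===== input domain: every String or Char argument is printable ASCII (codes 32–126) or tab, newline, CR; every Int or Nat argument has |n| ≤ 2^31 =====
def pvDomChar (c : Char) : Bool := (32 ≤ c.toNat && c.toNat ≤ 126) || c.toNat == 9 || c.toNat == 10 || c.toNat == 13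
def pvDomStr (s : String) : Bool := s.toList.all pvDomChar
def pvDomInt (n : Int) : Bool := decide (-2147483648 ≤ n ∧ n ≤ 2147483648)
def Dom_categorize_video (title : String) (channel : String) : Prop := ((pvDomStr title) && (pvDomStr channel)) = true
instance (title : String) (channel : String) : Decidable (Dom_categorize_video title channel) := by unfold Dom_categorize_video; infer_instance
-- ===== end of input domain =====

-- B replaces A's ordered early-exit if-cascade by one full pass over a flat keyword list with an argmin-priority accumulator; objective: alternative.


-- ===== PORT A =====
-- Literal port of A: lowercase both inputs, then the if-cascade of any-substring tests.
def categorize_video (title : String) (channel : String) : String :=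
  let title_lower := PySem.Str.lower title
  let channel_lower := PySem.Str.lower channel
  if (["phonics", "alphabet", "abc", "reading", "learn", "educational", "words", "letters"] : List String).any (fun x => PySem.Str.isIn x title_lower) then "Educational"
  else if (["yakka dee", "kidstv123", "numberblocks", "cbeebies", "bbc kids"] : List String).any (fun x => PySem.Str.isIn x channel_lower) then "Educational"
  else if (["peppa pig", "peppa"] : List String).any (fun x => PySem.Str.isIn x title_lower) then "Cartoon/Show"
  else if (["toca boca", "toca life", "avatar world", "roleplay", "role-play", "role play"] : List String).any (fun x => PySem.Str.isIn x title_lower) then "Gaming/Roleplay"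
  else if (["nursery rhymes", "kids songs", "song", "music"] : List String).any (fun x => PySem.Str.isIn x title_lower) then "Music/Songs"
  else if (["read aloud", "storytime", "story time", "book"] : List String).any (fun x => PySem.Str.isIn x title_lower) then "Storytime"
  else if (["logo sound", "quiz", "guess"] : List String).any (fun x => PySem.Str.isIn x title_lower) then "Quiz/Games"
  else if PySem.Str.isIn "routine" title_lower then "Gaming/Roleplay"
  else "Other"

-- ===== PORT B =====
-- B: flat _KEYWORDS list of (priority, use_channel, keyword, category); one full
-- pass keeping the best (minimum-priority) match; no early exit.
def cv_keywords : List (Nat × Bool × String × String) :=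
  [ (0, false, "phonics", "Educational"), (0, false, "alphabet", "Educational"),
    (0, false, "abc", "Educational"), (0, false, "reading", "Educational"),
    (0, false, "learn", "Educational"), (0, false, "educational", "Educational"),
    (0, false, "words", "Educational"), (0, false, "letters", "Educational"),
    (1, true, "yakka dee", "Educational"), (1, true, "kidstv123", "Educational"),
    (1, true, "numberblocks", "Educational"), (1, true, "cbeebies", "Educational"),
    (1, true, "bbc kids", "Educational"),
    (2, false, "peppa pig", "Cartoon/Show"), (2, false, "peppa", "Cartoon/Show"),
    (3, false, "toca boca", "Gaming/Roleplay"), (3, false, "toca life", "Gaming/Roleplay"),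
    (3, false, "avatar world", "Gaming/Roleplay"), (3, false, "roleplay", "Gaming/Roleplay"),
    (3, false, "role-play", "Gaming/Roleplay"), (3, false, "role play", "Gaming/Roleplay"),
    (4, false, "nursery rhymes", "Music/Songs"), (4, false, "kids songs", "Music/Songs"),
    (4, false, "song", "Music/Songs"), (4, false, "music", "Music/Songs"),
    (5, false, "read aloud", "Storytime"), (5, false, "storytime", "Storytime"),
    (5, false, "story time", "Storytime"), (5, false, "book", "Storytime"),
    (6, false, "logo sound", "Quiz/Games"), (6, false, "quiz", "Quiz/Games"),
    (6, false, "guess", "Quiz/Games"),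
    (7, false, "routine", "Gaming/Roleplay") ]

-- loop body of Source B: update best when the keyword occurs and its priority beats the current best
def cv_step (tl cl : String) (best : Option (Nat × String)) (e : Nat × Bool × String × String) : Option (Nat × String) :=
  let text := if e.2.1 then cl else tl
  if PySem.Str.isIn e.2.2.1 text && (match best with | none => true | some b => decide (e.1 < b.1)) then
    some (e.1, e.2.2.2)
  else best

def categorize_video_alt (title : String) (channel : String) : String :=
  let title_lower := PySem.Str.lower title
  let channel_lower := PySem.Str.lower channel
  match cv_keywords.foldl (cv_step title_lower channel_lower) none with
  | none => "Other"
  | some b => b.2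

-- ===== PRECONDITION & SPEC =====
def Spec_categorize_video (title : String) (channel : String) (out : String) : Prop := out = categorize_video_alt title channel
instance (title : String) (channel : String) (out : String) : Decidable (Spec_categorize_video title channel out) := by unfold Spec_categorize_video; infer_instance

-- ===== CLAIM =====
def Claim_equal_categorize_video : Prop := ∀ (title : String) (channel : String), Dom_categorize_video title channel → Spec_categorize_video title channel (categorize_video title channel)

-- ===== LEMMAS AND PROOFS =====

-- once the best priority is ≤ every remaining priority, the fold never updates
theorem cv_skip (tl cl : String) (p : Nat) (c : String) (l : List (Nat × Bool × String × String))
    (h : ∀ e ∈ l, p ≤ e.1) :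
    l.foldl (cv_step tl cl) (some (p, c)) = some (p, c) := by
  induction l with
  | nil => rfl
  | cons e t ih =>
    have hp : ¬ e.1 < p := Nat.not_lt.mpr (h e (List.mem_cons_self))
    simp only [List.foldl_cons, cv_step, hp, decide_false, Bool.and_false, if_neg,
      Bool.false_eq_true, not_false_eq_true]
    exact ih (fun x hx => h x (List.mem_cons_of_mem _ hx))

-- a block of entries sharing priority q and category c behaves, from accumulator none,
-- like one any-substring test
theorem cv_group (tl cl : String) (q : Nat) (c : String) (l : List (Nat × Bool × String × String))
    (hall : ∀ e ∈ l, e.1 = q ∧ e.2.2.2 = c) :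
    l.foldl (cv_step tl cl) none =
      (if l.any (fun e => PySem.Str.isIn e.2.2.1 (if e.2.1 then cl else tl)) then some (q, c) else none) := by
  induction l with
  | nil => rfl
  | cons e t ih =>
    obtain ⟨hq, hc⟩ := hall e (List.mem_cons_self)
    have hall' := fun x hx => hall x (List.mem_cons_of_mem e hx)
    by_cases hm : PySem.Str.isIn e.2.2.1 (if e.2.1 then cl else tl) = true
    · simp only [List.foldl_cons, cv_step, hm, Bool.true_and, if_pos, List.any_cons, Bool.true_or,
        hq, hc]
      exact cv_skip tl cl q c t (fun x hx => (hall' x hx).1 ▸ Nat.le_refl q)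
    · simp only [List.foldl_cons, cv_step, hm]
      simp only [Bool.not_eq_true] at hm
      simp only [hm, Bool.false_and, if_neg, Bool.false_eq_true, not_false_eq_true,
        List.any_cons, Bool.false_or]
      exact ih hall'

-- a matched block followed by higher-priority entries settles the fold
theorem cv_hit (tl cl : String) (q : Nat) (c : String) (g rest : List (Nat × Bool × String × String))
    (hall : ∀ e ∈ g, e.1 = q ∧ e.2.2.2 = c)
    (hrest : ∀ e ∈ rest, q ≤ e.1)
    (h : g.any (fun e => PySem.Str.isIn e.2.2.1 (if e.2.1 then cl else tl)) = true) :
    rest.foldl (cv_step tl cl) (g.foldl (cv_step tl cl) none) = some (q, c) := by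
  rw [cv_group tl cl q c g hall, if_pos h]
  exact cv_skip tl cl q c rest hrest

-- proof-only helpers: cv_keywords split into its eight constant-priority blocks
def cvg0 : List (Nat × Bool × String × String) :=
  [ (0, false, "phonics", "Educational"), (0, false, "alphabet", "Educational"), (0, false, "abc", "Educational"), (0, false, "reading", "Educational"), (0, false, "learn", "Educational"), (0, false, "educational", "Educational"), (0, false, "words", "Educational"), (0, false, "letters", "Educational") ]

def cvg1 : List (Nat × Bool × String × String) :=
  [ (1, true, "yakka dee", "Educational"), (1, true, "kidstv123", "Educational"), (1, true, "numberblocks", "Educational"), (1, true, "cbeebies", "Educational"), (1, true, "bbc kids", "Educational") ]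

def cvg2 : List (Nat × Bool × String × String) :=
  [ (2, false, "peppa pig", "Cartoon/Show"), (2, false, "peppa", "Cartoon/Show") ]

def cvg3 : List (Nat × Bool × String × String) :=
  [ (3, false, "toca boca", "Gaming/Roleplay"), (3, false, "toca life", "Gaming/Roleplay"), (3, false, "avatar world", "Gaming/Roleplay"), (3, false, "roleplay", "Gaming/Roleplay"), (3, false, "role-play", "Gaming/Roleplay"), (3, false, "role play", "Gaming/Roleplay") ]

def cvg4 : List (Nat × Bool × String × String) :=
  [ (4, false, "nursery rhymes", "Music/Songs"), (4, false, "kids songs", "Music/Songs"), (4, false, "song", "Music/Songs"), (4, false, "music", "Music/Songs") ]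

def cvg5 : List (Nat × Bool × String × String) :=
  [ (5, false, "read aloud", "Storytime"), (5, false, "storytime", "Storytime"), (5, false, "story time", "Storytime"), (5, false, "book", "Storytime") ]

def cvg6 : List (Nat × Bool × String × String) :=
  [ (6, false, "logo sound", "Quiz/Games"), (6, false, "quiz", "Quiz/Games"), (6, false, "guess", "Quiz/Games") ]

def cvg7 : List (Nat × Bool × String × String) :=
  [ (7, false, "routine", "Gaming/Roleplay") ]

-- each block's any-test coincides with the corresponding test in A's cascade
theorem cva0 (tl cl : String) : cvg0.any (fun e => PySem.Str.isIn e.2.2.1 (if e.2.1 then cl else tl)) = true ↔ (["phonics", "alphabet", "abc", "reading", "learn", "educational", "words", "letters"] : List String).any (fun x => PySem.Str.isIn x tl) = true := by simp [cvg0]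

theorem cva1 (tl cl : String) : cvg1.any (fun e => PySem.Str.isIn e.2.2.1 (if e.2.1 then cl else tl)) = true ↔ (["yakka dee", "kidstv123", "numberblocks", "cbeebies", "bbc kids"] : List String).any (fun x => PySem.Str.isIn x cl) = true := by simp [cvg1]

theorem cva2 (tl cl : String) : cvg2.any (fun e => PySem.Str.isIn e.2.2.1 (if e.2.1 then cl else tl)) = true ↔ (["peppa pig", "peppa"] : List String).any (fun x => PySem.Str.isIn x tl) = true := by simp [cvg2]

theorem cva3 (tl cl : String) : cvg3.any (fun e => PySem.Str.isIn e.2.2.1 (if e.2.1 then cl else tl)) = true ↔ (["toca boca", "toca life", "avatar world", "roleplay", "role-play", "role play"] : List String).any (fun x => PySem.Str.isIn x tl) = true := by simp [cvg3]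

theorem cva4 (tl cl : String) : cvg4.any (fun e => PySem.Str.isIn e.2.2.1 (if e.2.1 then cl else tl)) = true ↔ (["nursery rhymes", "kids songs", "song", "music"] : List String).any (fun x => PySem.Str.isIn x tl) = true := by simp [cvg4]

theorem cva5 (tl cl : String) : cvg5.any (fun e => PySem.Str.isIn e.2.2.1 (if e.2.1 then cl else tl)) = true ↔ (["read aloud", "storytime", "story time", "book"] : List String).any (fun x => PySem.Str.isIn x tl) = true := by simp [cvg5]

theorem cva6 (tl cl : String) : cvg6.any (fun e => PySem.Str.isIn e.2.2.1 (if e.2.1 then cl else tl)) = true ↔ (["logo sound", "quiz", "guess"] : List String).any (fun x => PySem.Str.isIn x tl) = true := by simp [cvg6]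

theorem cva7 (tl cl : String) : cvg7.any (fun e => PySem.Str.isIn e.2.2.1 (if e.2.1 then cl else tl)) = true ↔ PySem.Str.isIn "routine" tl = true := by simp [cvg7]

-- ===== VERDICT =====
theorem categorize_video_spec : Claim_equal_categorize_video := by
  intro title channel _
  unfold Spec_categorize_video categorize_video categorize_video_alt
  dsimp only []
  generalize PySem.Str.lower title = tl
  generalize PySem.Str.lower channel = cl
  rw [show cv_keywords = cvg0 ++ (cvg1 ++ (cvg2 ++ (cvg3 ++ (cvg4 ++ (cvg5 ++ (cvg6 ++ (cvg7))))))) from rfl]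
  by_cases h0 : (["phonics", "alphabet", "abc", "reading", "learn", "educational", "words", "letters"] : List String).any (fun x => PySem.Str.isIn x tl) = true
  · rw [if_pos h0, List.foldl_append, cv_hit tl cl 0 "Educational" cvg0 (cvg1 ++ (cvg2 ++ (cvg3 ++ (cvg4 ++ (cvg5 ++ (cvg6 ++ (cvg7))))))) (by decide) (by decide) ((cva0 tl cl).mpr h0)]
  · rw [if_neg h0, List.foldl_append, cv_group tl cl 0 "Educational" cvg0 (by decide), if_neg (fun hh => h0 ((cva0 tl cl).mp hh))]
    by_cases h1 : (["yakka dee", "kidstv123", "numberblocks", "cbeebies", "bbc kids"] : List String).any (fun x => PySem.Str.isIn x cl) = true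
    · rw [if_pos h1, List.foldl_append, cv_hit tl cl 1 "Educational" cvg1 (cvg2 ++ (cvg3 ++ (cvg4 ++ (cvg5 ++ (cvg6 ++ (cvg7)))))) (by decide) (by decide) ((cva1 tl cl).mpr h1)]
    · rw [if_neg h1, List.foldl_append, cv_group tl cl 1 "Educational" cvg1 (by decide), if_neg (fun hh => h1 ((cva1 tl cl).mp hh))]
      by_cases h2 : (["peppa pig", "peppa"] : List String).any (fun x => PySem.Str.isIn x tl) = true
      · rw [if_pos h2, List.foldl_append, cv_hit tl cl 2 "Cartoon/Show" cvg2 (cvg3 ++ (cvg4 ++ (cvg5 ++ (cvg6 ++ (cvg7))))) (by decide) (by decide) ((cva2 tl cl).mpr h2)]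
      · rw [if_neg h2, List.foldl_append, cv_group tl cl 2 "Cartoon/Show" cvg2 (by decide), if_neg (fun hh => h2 ((cva2 tl cl).mp hh))]
        by_cases h3 : (["toca boca", "toca life", "avatar world", "roleplay", "role-play", "role play"] : List String).any (fun x => PySem.Str.isIn x tl) = true
        · rw [if_pos h3, List.foldl_append, cv_hit tl cl 3 "Gaming/Roleplay" cvg3 (cvg4 ++ (cvg5 ++ (cvg6 ++ (cvg7)))) (by decide) (by decide) ((cva3 tl cl).mpr h3)]
        · rw [if_neg h3, List.foldl_append, cv_group tl cl 3 "Gaming/Roleplay" cvg3 (by decide), if_neg (fun hh => h3 ((cva3 tl cl).mp hh))]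
          by_cases h4 : (["nursery rhymes", "kids songs", "song", "music"] : List String).any (fun x => PySem.Str.isIn x tl) = true
          · rw [if_pos h4, List.foldl_append, cv_hit tl cl 4 "Music/Songs" cvg4 (cvg5 ++ (cvg6 ++ (cvg7))) (by decide) (by decide) ((cva4 tl cl).mpr h4)]
          · rw [if_neg h4, List.foldl_append, cv_group tl cl 4 "Music/Songs" cvg4 (by decide), if_neg (fun hh => h4 ((cva4 tl cl).mp hh))]
            by_cases h5 : (["read aloud", "storytime", "story time", "book"] : List String).any (fun x => PySem.Str.isIn x tl) = true
            · rw [if_pos h5, List.foldl_append, cv_hit tl cl 5 "Storytime" cvg5 (cvg6 ++ (cvg7)) (by decide) (by decide) ((cva5 tl cl).mpr h5)]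
            · rw [if_neg h5, List.foldl_append, cv_group tl cl 5 "Storytime" cvg5 (by decide), if_neg (fun hh => h5 ((cva5 tl cl).mp hh))]
              by_cases h6 : (["logo sound", "quiz", "guess"] : List String).any (fun x => PySem.Str.isIn x tl) = true
              · rw [if_pos h6, List.foldl_append, cv_hit tl cl 6 "Quiz/Games" cvg6 (cvg7) (by decide) (by decide) ((cva6 tl cl).mpr h6)]
              · rw [if_neg h6, List.foldl_append, cv_group tl cl 6 "Quiz/Games" cvg6 (by decide), if_neg (fun hh => h6 ((cva6 tl cl).mp hh))]
                by_cases h7 : PySem.Str.isIn "routine" tl = true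
                · rw [if_pos h7, cv_group tl cl 7 "Gaming/Roleplay" cvg7 (by decide), if_pos ((cva7 tl cl).mpr h7)]
                · rw [if_neg h7, cv_group tl cl 7 "Gaming/Roleplay" cvg7 (by decide), if_neg (fun hh => h7 ((cva7 tl cl).mp hh))]
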